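-- pv_equiv track=rewrite | github.com/vudinhduy26/PY_ABCD | python/BTPython/Largest-Cross-Sum.py | largest_cross_sum
-- ===== SOURCE A (Python) =====
-- def largest_cross_sum(arr):
--     h, w = range(len(arr)), range(len(arr[0]))
--     rows = [sum(row) for row in arr]
--     brr = []
--     cols = []
--     t = []
--     for i in range(len(arr[0])):
--         for j in range(len(arr)):
--             brr.append(arr[j][i])
--         cols.append(sum(brr))
--         brr = []
--     for k in h:
--         for g in w:
--           t.append(rows[k] + cols[g] - arr[k][g])
--     #return max(rows[j] + cols[i] - arr[j][i] for j in h for i in w)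
--     return max(t)
-- ===== SOURCE B (Python) =====
-- def largest_cross_sum(arr):
--     # One streaming pass over the rows, maintaining per-column running sums and the
--     # per-column running maximum of (rowSum - cell); final max over the w columns.
--     w = len(arr[0])
--     first = arr[0]
--     rs0 = sum(first)
--     cols = [first[g] for g in range(w)]
--     best = [rs0 - first[g] for g in range(w)]
--     for row in arr[1:]:
--         rs = sum(row)
--         cols = [c + x for c, x in zip(cols, row)]
--         best = [max(b, rs - row[g]) for g, b in enumerate(best)]
--     return max(c + b for c, b in zip(cols, best))
-- ===== Notes on version B (the rewrite author's own statement) =====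
-- stated objective: alternative
-- what changed: B replaces A's staged construction (row-sum list, column-major double loop building cols, then a flat n*w candidate list t fed to max) by a single streaming pass over the rows that maintains per-column running column sums and the per-column running maximum of rowSum-cell, finishing with one max over the w columns; the n*w candidate list is never materialized.
import Mathlib
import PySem

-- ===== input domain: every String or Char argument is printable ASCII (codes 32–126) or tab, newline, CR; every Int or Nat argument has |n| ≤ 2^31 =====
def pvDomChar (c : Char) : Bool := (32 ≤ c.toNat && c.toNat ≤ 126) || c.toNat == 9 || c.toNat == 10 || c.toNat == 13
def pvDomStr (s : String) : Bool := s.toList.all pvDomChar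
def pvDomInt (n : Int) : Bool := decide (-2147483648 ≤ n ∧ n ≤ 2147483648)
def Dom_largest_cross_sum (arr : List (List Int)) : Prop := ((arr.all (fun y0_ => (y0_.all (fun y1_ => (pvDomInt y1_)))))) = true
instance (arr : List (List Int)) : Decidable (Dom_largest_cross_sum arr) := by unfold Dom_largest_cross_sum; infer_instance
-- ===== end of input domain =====

-- B replaces A's staged build (rows list, column double loop, flat t list, max) by one
-- streaming pass over the rows maintaining per-column running sums and running maxima.

-- ===== PORT A =====
def largest_cross_sum (arr : List (List Int)) : Int :=
  let h := PySem.List.pyRange 0 (arr.length : Int)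
  let w := PySem.List.pyRange 0 ((PySem.List.pyGetD arr 0 []).length : Int)
  let rows := arr.map (fun row => row.sum)
  let cols := (PySem.List.pyRange 0 ((PySem.List.pyGetD arr 0 []).length : Int)).foldl
    (fun cols i =>
      let brr := (PySem.List.pyRange 0 (arr.length : Int)).foldl
        (fun brr j => brr ++ [PySem.List.pyGetD (PySem.List.pyGetD arr j []) i 0]) []
      cols ++ [brr.sum]) []
  let t := h.foldl (fun t k =>
      w.foldl (fun t g =>
        t ++ [PySem.List.pyGetD rows k 0 + PySem.List.pyGetD cols g 0
              - PySem.List.pyGetD (PySem.List.pyGetD arr k []) g 0]) t) []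
  (PySem.List.max? t (fun y => y)).getD 0

-- ===== PORT B =====
-- one fold over arr[1:], state = (cols, best); comprehensions become maps, as in Source B
def lcsStep (st : List Int × List Int) (row : List Int) : List Int × List Int :=
  let rs := row.sum
  ((st.1.zip row).map (fun p => p.1 + p.2),
   (PySem.List.enumerate st.2).map (fun q => max q.2 (rs - PySem.List.pyGetD row q.1 0)))

def largest_cross_sum_alt (arr : List (List Int)) : Int :=
  let first := PySem.List.pyGetD arr 0 []
  let w := first.length
  let rs0 := first.sum
  let cols0 := (List.range w).map (fun (g : Nat) => PySem.List.pyGetD first ((g : Nat) : Int) 0)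
  let best0 := (List.range w).map (fun (g : Nat) => rs0 - PySem.List.pyGetD first ((g : Nat) : Int) 0)
  let st := (PySem.List.slice arr (some 1) none).foldl lcsStep (cols0, best0)
  (PySem.List.max? ((st.1.zip st.2).map (fun p => p.1 + p.2)) (fun y => y)).getD 0

-- ===== PRECONDITION & SPEC =====
-- Pre_ excludes exactly the inputs where A raises: empty arr (IndexError on arr[0]),
-- an empty first row (ValueError: max of the empty t), and a row shorter than the first
-- (IndexError while building the columns).
def Pre_largest_cross_sum (arr : List (List Int)) : Prop :=
  arr ≠ [] ∧ (arr.headD []) ≠ [] ∧ ∀ r ∈ arr, (arr.headD []).length ≤ r.length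
instance (arr : List (List Int)) : Decidable (Pre_largest_cross_sum arr) := by
  unfold Pre_largest_cross_sum; infer_instance
def pvWitness_largest_cross_sum : List (List Int) := [[1, 2], [3, 4]]

def Spec_largest_cross_sum (arr : List (List Int)) (out : Int) : Prop := out = largest_cross_sum_alt arr
instance (arr : List (List Int)) (out : Int) : Decidable (Spec_largest_cross_sum arr out) := by unfold Spec_largest_cross_sum; infer_instance

-- ===== CLAIM (what is proved, stated in full; the proofs are below) =====
def Claim_equal_largest_cross_sum : Prop := ∀ (arr : List (List Int)), Dom_largest_cross_sum arr → Pre_largest_cross_sum arr → Spec_largest_cross_sum arr (largest_cross_sum arr)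

-- ===== LEMMAS AND PROOFS =====

-- maxv xs = max(xs) in Python (value only; xs nonempty in all uses).
def maxv (xs : List Int) : Int := (PySem.List.max? xs (fun y => y)).getD 0

lemma foldl_max_max (t : List Int) : ∀ a b : Int, t.foldl max (max a b) = max a (t.foldl max b) := by
  induction t with
  | nil => intro a b; simp
  | cons c t ih =>
    intro a b
    simp only [List.foldl_cons]
    rw [max_assoc, ih]

lemma foldl_max_eq_max_maxv (ys : List Int) (h : ys ≠ []) (a : Int) :
    ys.foldl max a = max a (maxv ys) := by
  cases ys with
  | nil => exact absurd rfl h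
  | cons y t =>
    simp only [maxv, PySem.List.max?_id_cons, Option.getD_some, List.foldl_cons]
    exact foldl_max_max t a y

lemma maxv_cons (x : Int) (ys : List Int) (h : ys ≠ []) :
    maxv (x :: ys) = max x (maxv ys) := by
  simp only [maxv, PySem.List.max?_id_cons, Option.getD_some]
  exact foldl_max_eq_max_maxv ys h x

lemma maxv_mem (xs : List Int) (h : xs ≠ []) : maxv xs ∈ xs := by
  induction xs with
  | nil => exact absurd rfl h
  | cons x t ih =>
    by_cases ht : t = []
    · subst ht; simp [maxv, PySem.List.max?_id_cons]
    · rw [maxv_cons x t ht]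
      rcases max_choice x (maxv t) with h1 | h1 <;> rw [h1]
      · exact List.mem_cons_self
      · exact List.mem_cons_of_mem _ (ih ht)

lemma le_maxv (xs : List Int) (y : Int) (h : y ∈ xs) : y ≤ maxv xs := by
  induction xs with
  | nil => simp at h
  | cons x t ih =>
    by_cases ht : t = []
    · subst ht; simp at h; simp [h, maxv, PySem.List.max?_id_cons]
    · rw [maxv_cons x t ht]
      rcases List.mem_cons.mp h with h1 | h1
      · exact h1 ▸ le_max_left _ _
      · exact le_trans (ih h1) (le_max_right _ _)

lemma maxv_le (xs : List Int) (m : Int) (h : xs ≠ []) (hle : ∀ y ∈ xs, y ≤ m) :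
    maxv xs ≤ m := hle _ (maxv_mem xs h)

lemma maxv_map_ne_nil {α : Type} (l : List α) (f : α → Int) (h : l ≠ []) : l.map f ≠ [] := by
  simpa using h

-- swapping two iterated maxima: both sides are the maximum of all f a b
lemma maxv_swap {α β : Type} (l1 : List α) (l2 : List β) (f : α → β → Int)
    (h1 : l1 ≠ []) (h2 : l2 ≠ []) :
    maxv (l1.map (fun a => maxv (l2.map (f a))))
      = maxv (l2.map (fun b => maxv (l1.map (fun a => f a b)))) := by
  apply le_antisymm
  · apply maxv_le _ _ (maxv_map_ne_nil _ _ h1)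
    intro y hy
    obtain ⟨a, ha, rfl⟩ := List.mem_map.mp hy
    apply maxv_le _ _ (maxv_map_ne_nil _ _ h2)
    intro z hz
    obtain ⟨b, hb, rfl⟩ := List.mem_map.mp hz
    calc f a b ≤ maxv (l1.map (fun a => f a b)) :=
            le_maxv _ _ (List.mem_map.mpr ⟨a, ha, rfl⟩)
      _ ≤ _ := le_maxv _ _ (List.mem_map.mpr ⟨b, hb, rfl⟩)
  · apply maxv_le _ _ (maxv_map_ne_nil _ _ h2)
    intro y hy
    obtain ⟨b, hb, rfl⟩ := List.mem_map.mp hy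
    apply maxv_le _ _ (maxv_map_ne_nil _ _ h1)
    intro z hz
    obtain ⟨a, ha, rfl⟩ := List.mem_map.mp hz
    calc f a b ≤ maxv (l2.map (f a)) :=
            le_maxv _ _ (List.mem_map.mpr ⟨b, hb, rfl⟩)
      _ ≤ _ := le_maxv _ _ (List.mem_map.mpr ⟨a, ha, rfl⟩)

lemma foldl_max_map_add (a : Int) (t : List Int) : ∀ x : Int,
    (t.map (fun y => a + y)).foldl max (a + x) = a + t.foldl max x := by
  induction t with
  | nil => intro x; simp
  | cons c t ih =>
    intro x
    simp only [List.map_cons, List.foldl_cons]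
    rw [max_add_add_left, ih]

lemma maxv_map_add (a : Int) (xs : List Int) (hx : xs ≠ []) :
    maxv (xs.map (fun y => a + y)) = a + maxv xs := by
  cases xs with
  | nil => exact absurd rfl hx
  | cons x t =>
    simp only [List.map_cons, maxv, PySem.List.max?_id_cons, Option.getD_some]
    exact foldl_max_map_add a t x

lemma maxv_append (xs ys : List Int) (hx : xs ≠ []) (hy : ys ≠ []) :
    maxv (xs ++ ys) = max (maxv xs) (maxv ys) := by
  cases xs with
  | nil => exact absurd rfl hx
  | cons x t =>
    simp only [maxv, List.cons_append, PySem.List.max?_id_cons, Option.getD_some,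
      List.foldl_append]
    exact foldl_max_eq_max_maxv ys hy _

lemma maxv_flatMap {α : Type} (l : List α) (f : α → List Int) (hl : l ≠ [])
    (hf : ∀ r ∈ l, f r ≠ []) :
    maxv (l.flatMap f) = maxv (l.map (fun r => maxv (f r))) := by
  induction l with
  | nil => exact absurd rfl hl
  | cons r rest ih =>
    by_cases hr : rest = []
    · subst hr
      simp only [List.flatMap_cons, List.flatMap_nil, List.append_nil, List.map_cons,
        List.map_nil]
      rfl
    · have hfr : f r ≠ [] := hf r (List.mem_cons_self)
      have hrest : rest.flatMap f ≠ [] := by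
        cases rest with
        | nil => exact absurd rfl hr
        | cons s t =>
          have : f s ≠ [] := hf s (by simp)
          simp only [List.flatMap_cons, ne_eq, List.append_eq_nil_iff]
          tauto
      have hmap : rest.map (fun r => maxv (f r)) ≠ [] := by
        simpa using hr
      rw [List.flatMap_cons, maxv_append _ _ hfr hrest, List.map_cons,
        maxv_cons _ _ hmap, ih hr (fun s hs => hf s (List.mem_cons_of_mem _ hs))]

lemma map_range_getD {α β : Type} (l : List α) (d : α) (F : α → β) :
    (List.range l.length).map (fun k => F (l.getD k d)) = l.map F := by
  apply List.ext_getElem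
  · simp
  · intro i h1 h2
    simp at h1 h2 ⊢
    simp [List.getElem?_eq_getElem h2]

lemma colmap_eq (arr : List (List Int)) (x : Nat) :
    (List.range arr.length).map (fun j => (arr.getD j []).getD x 0)
      = arr.map (fun r => r.getD x 0) :=
  map_range_getD arr [] (fun r => r.getD x 0)

lemma flatMap_range_getD {α β : Type} (l : List α) (d : α) (F : α → List β) :
    (List.range l.length).flatMap (fun k => F (l.getD k d)) = l.flatMap F := by
  rw [List.flatMap_def, List.flatMap_def, map_range_getD]

-- column sums, the shared normal form of A's cols and B's cols
def colsums (arr : List (List Int)) : List Int :=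
  (List.range (arr.headD []).length).map (fun i => (arr.map (fun r => r.getD i 0)).sum)

-- zip of a length-w range-map with a row of length ≥ w, as a range-map
lemma zip_range_map (w : Nat) (C : Nat → Int) (r : List Int) (hr : w ≤ r.length) :
    ((List.range w).map C).zip r = (List.range w).map (fun g => (C g, r.getD g 0)) := by
  apply List.ext_getElem
  · simp; omega
  · intro i h1 h2
    simp only [List.length_zip, List.length_map, List.length_range] at h1
    have hiw : i < w := by omega
    have hir : i < r.length := by omega
    simp [List.getElem_zip, hir, List.getD_eq_getElem?_getD]

-- one fold step of B, on states in range-map normal form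
lemma step_eq (w : Nat) (C B : Nat → Int) (r : List Int) (hr : w ≤ r.length) :
    lcsStep ((List.range w).map C, (List.range w).map B) r
      = ((List.range w).map (fun g => C g + r.getD g 0),
         (List.range w).map (fun g => max (B g) (r.sum - r.getD g 0))) := by
  simp only [lcsStep, Prod.mk.injEq]
  refine ⟨?_, ?_⟩
  · rw [zip_range_map w C r hr, List.map_map]
    rfl
  · rw [PySem.List.enumerate_eq_map_pyRange _ 0, List.map_map]
    simp only [PySem.List.len_eq, List.length_map, List.length_range,
      PySem.List.pyRange_one, Int.sub_zero, Int.toNat_natCast, List.map_map]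
    apply List.map_congr_left
    intro g hg
    simp only [Function.comp_def, zero_add, PySem.List.pyGetD_natCast,
      List.getD_eq_getElem?_getD, List.getElem?_map,
      List.getElem?_range (List.mem_range.mp hg), Option.map_some, Option.getD_some]

-- the fold invariant: after processing proc (all rows of length ≥ w) the state is
-- (per-column partial sums, per-column partial maxima), both as range-maps
lemma fold_inv (w : Nat) (proc : List (List Int)) (hproc : ∀ r ∈ proc, w ≤ r.length) :
    ∀ (C B : Nat → Int),
    proc.foldl lcsStep ((List.range w).map C, (List.range w).map B)
      = ((List.range w).map (fun g => C g + (proc.map (fun r => r.getD g 0)).sum),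
         (List.range w).map (fun g => proc.foldl (fun b r => max b (r.sum - r.getD g 0)) (B g))) := by
  induction proc with
  | nil => intro C B; simp
  | cons r rest ih =>
    intro C B
    rw [List.foldl_cons, step_eq w C B r (hproc r List.mem_cons_self),
      ih (fun s hs => hproc s (List.mem_cons_of_mem _ hs))]
    simp only [List.map_cons, List.sum_cons, List.foldl_cons, Prod.mk.injEq]
    refine ⟨?_, trivial⟩
    apply List.map_congr_left; intro g _; ring

lemma foldl_max_sub (g : Nat) (rest : List (List Int)) : ∀ b : Int,
    rest.foldl (fun b r => max b (r.sum - r.getD g 0)) b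
      = (rest.map (fun r => r.sum - r.getD g 0)).foldl max b := by
  induction rest with
  | nil => intro b; rfl
  | cons r t ih => intro b; simp only [List.foldl_cons, List.map_cons]; exact ih _

-- ===== VERDICT (by name: the statement is the Claim_ definition above) =====
theorem largest_cross_sum_spec : Claim_equal_largest_cross_sum := by
  intro arr _ hpre
  obtain ⟨hne, hhead, hall⟩ := hpre
  have hw0 : 0 < (arr.headD []).length := List.length_pos_iff.mpr hhead
  have hrange_ne : List.range (arr.headD []).length ≠ [] := by
    intro h
    rw [List.range_eq_nil] at h
    omega
  have hget0 : PySem.List.pyGetD arr 0 [] = arr.headD [] := by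
    cases arr with
    | nil => exact absurd rfl hne
    | cons a rest => simp [PySem.List.pyGetD]
  show largest_cross_sum arr = largest_cross_sum_alt arr
  -- A to normal form
  have hA : largest_cross_sum arr = maxv (arr.flatMap (fun r =>
      (List.range (arr.headD []).length).map (fun g =>
        r.sum + (colsums arr).getD g 0 - r.getD g 0))) := by
    simp only [largest_cross_sum, hget0,
      PySem.List.foldl_append_singleton_eq_map, PySem.List.foldl_append_eq_flatMap,
      List.nil_append, PySem.List.pyRange_one, Int.sub_zero, Int.toNat_natCast, zero_add,
      List.map_map, List.flatMap_map, Function.comp_def, PySem.List.pyGetD_natCast]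
    have hrows : ∀ a : Nat,
        (arr.map (fun row => row.sum)).getD a (([] : List Int).sum) = (arr.getD a []).sum :=
      fun a => List.getD_map arr [] _
    simp only [List.sum_nil] at hrows
    simp only [hrows, colmap_eq]
    rw [flatMap_range_getD arr [] (fun r => List.map (fun x => r.sum
      + ((List.range (arr.headD []).length).map
          (fun i => (arr.map (fun r' => r'.getD i 0)).sum)).getD x 0
      - r.getD x 0) (List.range (arr.headD []).length))]
    simp only [maxv, colsums]
  -- B to normal form
  obtain ⟨r0, rest, rfl⟩ : ∃ r0 rest, arr = r0 :: rest := by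
    cases arr with
    | nil => exact absurd rfl hne
    | cons a t => exact ⟨a, t, rfl⟩
  simp only [List.headD_cons] at hA hw0 hrange_ne ⊢
  have hrest : ∀ r ∈ rest, r0.length ≤ r.length :=
    fun r hr => by simpa using hall r (List.mem_cons_of_mem _ hr)
  have hB : largest_cross_sum_alt (r0 :: rest)
      = maxv ((List.range r0.length).map (fun g =>
          (colsums (r0 :: rest)).getD g 0
            + maxv ((r0 :: rest).map (fun r => r.sum - r.getD g 0)))) := by
    simp only [largest_cross_sum_alt, PySem.List.pyGetD_zero_cons,
      PySem.List.slice_from_one, List.tail_cons, PySem.List.pyGetD_natCast]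
    rw [fold_inv r0.length rest hrest]
    rw [zip_range_map r0.length _ _ (by simp)]
    simp only [List.map_map]
    refine congrArg (fun L => (PySem.List.max? L (fun y => y)).getD 0) ?_
    apply List.map_congr_left
    intro g hg
    have hg' : g < r0.length := List.mem_range.mp hg
    have hgetm : ∀ (G : Nat → Int),
        ((List.range r0.length).map G).getD g 0 = G g := by
      intro G
      simp [List.getD_eq_getElem?_getD, List.getElem?_range hg']
    simp only [Function.comp_def, hgetm]
    have hcol : (colsums (r0 :: rest)).getD g 0
        = r0.getD g 0 + (rest.map (fun r => r.getD g 0)).sum := by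
      simp only [colsums, List.headD_cons, hgetm, List.map_cons, List.sum_cons]
    rw [hcol, foldl_max_sub, List.map_cons]
    by_cases hr : rest = []
    · subst hr; simp [maxv, PySem.List.max?_id_cons]
    · rw [foldl_max_eq_max_maxv _ (maxv_map_ne_nil _ _ hr),
        maxv_cons _ _ (maxv_map_ne_nil _ _ hr)]
  -- connect the two normal forms
  rw [hA, hB,
    maxv_flatMap _ _ (by simp) (fun r _ => maxv_map_ne_nil _ _ hrange_ne),
    maxv_swap (r0 :: rest) (List.range r0.length) _ (by simp) hrange_ne]
  congr 1
  apply List.map_congr_left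
  intro g _
  rw [show (fun r : List Int => r.sum + (colsums (r0 :: rest)).getD g 0 - r.getD g 0)
        = (fun y => (colsums (r0 :: rest)).getD g 0 + y) ∘ (fun r : List Int => r.sum - r.getD g 0)
      from funext (fun r => by simp only [Function.comp_def]; ring),
    ← List.map_map]
  exact maxv_map_add _ _ (by simp)
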